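-- pv_equiv track=rewrite | github.com/scarlens250/ng_source_bot | config.py | get_bonus_info
-- ===== SOURCE A (Python) =====
-- DEPOSIT_BONUSES = [
--     {"min_uah": 0, "min_usdt": 0, "bonus": 0},
--     {"min_uah": 500, "min_usdt": 12.5, "bonus": 3},
--     {"min_uah": 1000, "min_usdt": 25, "bonus": 5},
--     {"min_uah": 2000, "min_usdt": 50, "bonus": 7},
--     {"min_uah": 3500, "min_usdt": 87.5, "bonus": 8},
--     {"min_uah": 5000, "min_usdt": 125, "bonus": 10},
-- ]
--
-- def get_bonus_info(amount):
--     current_bonus = 0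
--     next_level = None
--     for b in DEPOSIT_BONUSES:
--         if amount >= b["min_uah"]:
--             current_bonus = b["bonus"]
--         elif next_level is None:
--             next_level = b
--     if next_level:
--         next_need = next_level["min_uah"] - amount
--         next_bonus = next_level["bonus"]
--         return current_bonus, next_need, next_bonus
--     return current_bonus, 0, 0
-- ===== SOURCE B (Python) =====
-- THRESHOLDS = [0, 500, 1000, 2000, 3500, 5000]
-- BONUSES = [0, 3, 5, 7, 8, 10]
--
-- def get_bonus_info(amount):
--     # binary search for the boundary index: number of thresholds <= amount
--     lo, hi = 0, len(THRESHOLDS)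
--     while lo < hi:
--         mid = (lo + hi) // 2
--         if THRESHOLDS[mid] <= amount:
--             lo = mid + 1
--         else:
--             hi = mid
--     current_bonus = BONUSES[lo - 1] if lo > 0 else 0
--     if lo < len(THRESHOLDS):
--         return current_bonus, THRESHOLDS[lo] - amount, BONUSES[lo]
--     return current_bonus, 0, 0
-- ===== Notes on version B (the rewrite author's own statement) =====
-- stated objective: alternative
-- what changed: Replaces the interleaved linear scan (tracking current_bonus and the first unreached tier together) with a binary search for the boundary index over the threshold list, then indexing the bonus/threshold tables on both sides of that index.
import Mathlib
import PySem

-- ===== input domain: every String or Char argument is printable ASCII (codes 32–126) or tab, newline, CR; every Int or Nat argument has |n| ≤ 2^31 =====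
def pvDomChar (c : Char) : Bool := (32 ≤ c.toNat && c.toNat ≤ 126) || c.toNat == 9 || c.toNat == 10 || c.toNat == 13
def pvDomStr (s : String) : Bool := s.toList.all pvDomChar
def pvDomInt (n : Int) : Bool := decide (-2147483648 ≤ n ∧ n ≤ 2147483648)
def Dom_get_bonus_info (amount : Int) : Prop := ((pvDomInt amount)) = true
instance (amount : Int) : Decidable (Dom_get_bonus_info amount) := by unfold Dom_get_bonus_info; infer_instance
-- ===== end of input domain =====

-- B replaces A's interleaved linear scan with a binary search for the boundary index
-- plus table lookups on both sides of it (alternative decomposition; same results).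

-- ===== PORT A =====
-- each DEPOSIT_BONUSES entry as (min_uah, bonus); the unused min_usdt field is omitted
def depositBonuses : List (Int × Int) :=
  [(0, 0), (500, 3), (1000, 5), (2000, 7), (3500, 8), (5000, 10)]

def get_bonus_info (amount : Int) : Int × Int × Int :=
  -- state = (current_bonus, next_level); the for-loop is the fold over DEPOSIT_BONUSES
  let st := depositBonuses.foldl
    (fun (s : Int × Option (Int × Int)) b =>
      if amount ≥ b.1 then (b.2, s.2)
      else if s.2 = none then (s.1, some b)
      else s)
    (0, none)
  match st.2 with
  | some nl => (st.1, nl.1 - amount, nl.2)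
  | none => (st.1, 0, 0)

-- ===== PORT B =====
def altThresholds : List Int := [0, 500, 1000, 2000, 3500, 5000]
def altBonuses : List Int := [0, 3, 5, 7, 8, 10]

-- hand port of Source B's while-loop binary search (indices stay in range, so getD is exact)
def altBsearch (amount : Int) (lo hi : Nat) : Nat :=
  if lo < hi then
    let mid := (lo + hi) / 2
    if altThresholds.getD mid 0 ≤ amount then altBsearch amount (mid + 1) hi
    else altBsearch amount lo mid
  else lo
termination_by hi - lo
decreasing_by all_goals omega

def get_bonus_info_alt (amount : Int) : Int × Int × Int :=
  let i := altBsearch amount 0 altThresholds.length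
  let current_bonus := if i > 0 then altBonuses.getD (i - 1) 0 else 0
  if i < altThresholds.length then
    (current_bonus, altThresholds.getD i 0 - amount, altBonuses.getD i 0)
  else (current_bonus, 0, 0)

-- ===== PRECONDITION & SPEC =====
def Spec_get_bonus_info (amount : Int) (out : Int × Int × Int) : Prop := out = get_bonus_info_alt amount
instance (amount : Int) (out : Int × Int × Int) : Decidable (Spec_get_bonus_info amount out) := by unfold Spec_get_bonus_info; infer_instance

-- ===== CLAIM (what is proved, stated in full; the proofs are below) =====
def Claim_equal_get_bonus_info : Prop := ∀ (amount : Int), Dom_get_bonus_info amount → Spec_get_bonus_info amount (get_bonus_info amount)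

-- ===== LEMMAS AND PROOFS =====

-- the binary search computes the boundary index (number of thresholds ≤ amount)
theorem bsearch_eval (amount : Int) :
    altBsearch amount 0 6 =
      if amount < 0 then 0 else if amount < 500 then 1 else if amount < 1000 then 2
      else if amount < 2000 then 3 else if amount < 3500 then 4
      else if amount < 5000 then 5 else 6 := by
  by_cases h0 : amount < 0 <;> by_cases h1 : amount < 500 <;> by_cases h2 : amount < 1000 <;>
    by_cases h3 : amount < 2000 <;> by_cases h4 : amount < 3500 <;> by_cases h5 : amount < 5000 <;>
    (try omega) <;>
    simp only [h0, h1, h2, h3, h4, h5, if_true, if_false] <;>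
    · rw [altBsearch]; norm_num [altThresholds]
      repeat first
        | omega
        | (rw [if_pos (by omega)]; rw [altBsearch]; norm_num [altThresholds])
        | (rw [if_neg (by omega)]; rw [altBsearch]; norm_num [altThresholds])

-- closed form of A's scan, by the same interval case split
theorem a_eval (amount : Int) :
    get_bonus_info amount =
      if amount < 0 then (0, 0 - amount, 0) else if amount < 500 then (0, 500 - amount, 3)
      else if amount < 1000 then (3, 1000 - amount, 5) else if amount < 2000 then (5, 2000 - amount, 7)
      else if amount < 3500 then (7, 3500 - amount, 8) else if amount < 5000 then (8, 5000 - amount, 10)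
      else (10, 0, 0) := by
  by_cases h0 : amount < 0 <;> by_cases h1 : amount < 500 <;> by_cases h2 : amount < 1000 <;>
    by_cases h3 : amount < 2000 <;> by_cases h4 : amount < 3500 <;> by_cases h5 : amount < 5000 <;>
    (try omega) <;>
    simp [get_bonus_info, depositBonuses, List.foldl,
      h0, h1, h2, h3, h4, h5,
      show (amount ≥ 0) ↔ ¬ amount < 0 from by omega,
      show (amount ≥ 500) ↔ ¬ amount < 500 from by omega,
      show (amount ≥ 1000) ↔ ¬ amount < 1000 from by omega,
      show (amount ≥ 2000) ↔ ¬ amount < 2000 from by omega,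
      show (amount ≥ 3500) ↔ ¬ amount < 3500 from by omega,
      show (amount ≥ 5000) ↔ ¬ amount < 5000 from by omega]

-- closed form of B, via bsearch_eval
theorem b_eval (amount : Int) :
    get_bonus_info_alt amount =
      if amount < 0 then (0, 0 - amount, 0) else if amount < 500 then (0, 500 - amount, 3)
      else if amount < 1000 then (3, 1000 - amount, 5) else if amount < 2000 then (5, 2000 - amount, 7)
      else if amount < 3500 then (7, 3500 - amount, 8) else if amount < 5000 then (8, 5000 - amount, 10)
      else (10, 0, 0) := by
  unfold get_bonus_info_alt
  rw [show altThresholds.length = 6 from rfl, bsearch_eval]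
  split_ifs <;> norm_num [altThresholds, altBonuses]

-- ===== VERDICT (by name: the statement is the Claim_ definition above) =====
theorem get_bonus_info_spec : Claim_equal_get_bonus_info := by
  intro amount _
  unfold Spec_get_bonus_info
  rw [a_eval, b_eval]
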